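-- pv_equiv track=rewrite | github.com/MartinEBravo/google-foobar | Level 2/a.py | solution
-- ===== SOURCE A (Python) =====
-- def solution(x, y):
--     # Your code here
--     result = 1
--     i,j = 1,1
--     while j < y:
--         result += i
--         i += 1
--         j += 1
--     i = 1
--     j = y+1
--     while i < x:
--         result += j
--         i += 1
--         j += 1
--     return str(result)
-- ===== SOURCE B (Python) =====
-- def solution(x, y):
--     a = y - 1 if y > 1 else 0  # iterations of A's first loop
--     b = x - 1 if x > 1 else 0  # iterations of A's second loop
--     return str(1 + a * (a + 1) // 2 + b * (y + 1) + b * (b - 1) // 2)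
-- ===== Notes on version B (the rewrite author's own statement) =====
-- stated objective: faster
-- what changed: Replaced the two O(x+y) accumulation loops with closed-form triangular-number sums computed in O(1).
import Mathlib
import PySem

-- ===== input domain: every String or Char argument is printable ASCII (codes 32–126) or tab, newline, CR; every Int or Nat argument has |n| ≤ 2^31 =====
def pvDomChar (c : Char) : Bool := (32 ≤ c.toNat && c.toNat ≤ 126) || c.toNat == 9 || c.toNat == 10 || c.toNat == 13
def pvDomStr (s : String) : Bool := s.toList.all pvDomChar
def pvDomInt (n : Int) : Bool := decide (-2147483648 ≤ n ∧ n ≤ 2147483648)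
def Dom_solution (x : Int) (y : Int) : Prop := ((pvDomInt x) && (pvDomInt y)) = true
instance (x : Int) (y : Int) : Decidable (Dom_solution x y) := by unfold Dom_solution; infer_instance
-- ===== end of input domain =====

-- B replaces A's two counting loops with closed-form triangular-number arithmetic (O(1) vs O(x+y)).

-- ===== PORT A =====
-- first while loop: while j < y: result += i; i += 1; j += 1
def solutionLoop1 (result i j y : Int) : Int :=
  if j < y then solutionLoop1 (result + i) (i + 1) (j + 1) y else result
termination_by (y - j).toNat
decreasing_by omega

-- second while loop: while i < x: result += j; i += 1; j += 1
def solutionLoop2 (result i j x : Int) : Int :=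
  if i < x then solutionLoop2 (result + j) (i + 1) (j + 1) x else result
termination_by (x - i).toNat
decreasing_by omega

def solution (x : Int) (y : Int) : String :=
  PySem.Int.toStr (solutionLoop2 (solutionLoop1 1 1 1 y) 1 (y + 1) x)

-- ===== PORT B =====
def solution_alt (x : Int) (y : Int) : String :=
  let a : Int := if 1 < y then y - 1 else 0
  let b : Int := if 1 < x then x - 1 else 0
  PySem.Int.toStr (1 + PySem.Int.floordiv (a * (a + 1)) 2 + b * (y + 1) + PySem.Int.floordiv (b * (b - 1)) 2)

-- ===== PRECONDITION & SPEC =====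
def Spec_solution (x : Int) (y : Int) (out : String) : Prop := out = solution_alt x y
instance (x : Int) (y : Int) (out : String) : Decidable (Spec_solution x y out) := by unfold Spec_solution; infer_instance

-- ===== CLAIM (what is proved, stated in full; the proofs are below) =====
def Claim_equal_solution : Prop := ∀ (x : Int) (y : Int), Dom_solution x y → Spec_solution x y (solution x y)

-- ===== LEMMAS AND PROOFS =====

-- sum of k over range n, as an Int
def triInt (n : Nat) : Int := ∑ k ∈ Finset.range n, (k : Int)

theorem triInt_succ (n : Nat) : triInt (n + 1) = triInt n + n := by
  simp [triInt, Finset.sum_range_succ]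

theorem two_triInt (n : Nat) : 2 * triInt n = (n : Int) * (n - 1) := by
  induction n with
  | zero => simp [triInt]
  | succ m ih =>
    rw [triInt_succ]
    push_cast
    push_cast at ih
    linarith

-- the loops compute r plus a shifted arithmetic series
theorem loop1_eq (n : Nat) : ∀ (r i j y : Int), (y - j).toNat = n →
    solutionLoop1 r i j y = r + n * i + triInt n := by
  induction n with
  | zero =>
    intro r i j y h
    rw [solutionLoop1]
    have : ¬ j < y := by omega
    simp [this, triInt]
  | succ m ih =>
    intro r i j y h
    rw [solutionLoop1]
    have hj : j < y := by omega
    rw [if_pos hj, ih (r + i) (i + 1) (j + 1) y (by omega), triInt_succ]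
    push_cast
    ring

theorem loop2_eq (n : Nat) : ∀ (r i j x : Int), (x - i).toNat = n →
    solutionLoop2 r i j x = r + n * j + triInt n := by
  induction n with
  | zero =>
    intro r i j x h
    rw [solutionLoop2]
    have : ¬ i < x := by omega
    simp [this, triInt]
  | succ m ih =>
    intro r i j x h
    rw [solutionLoop2]
    have hi : i < x := by omega
    rw [if_pos hi, ih (r + j) (i + 1) (j + 1) x (by omega), triInt_succ]
    push_cast
    ring

theorem fdiv_two_mul (s : Int) : PySem.Int.floordiv (2 * s) 2 = s := by
  rw [PySem.Int.floordiv_eq_ediv_of_pos (by norm_num)]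
  omega

-- ===== VERDICT (by name: the statement is the Claim_ definition above) =====
theorem solution_spec : Claim_equal_solution := by
  intro x y _
  unfold Spec_solution solution solution_alt
  set n : Nat := (y - 1).toNat with hn
  set m : Nat := (x - 1).toNat with hm
  rw [loop1_eq n 1 1 1 y (by omega), loop2_eq m _ 1 (y + 1) x (by omega)]
  have ha : (if 1 < y then y - 1 else 0) = (n : Int) := by split <;> omega
  have hb : (if 1 < x then x - 1 else 0) = (m : Int) := by split <;> omega
  simp only [ha, hb]
  have h1 : (n : Int) * ((n : Int) + 1) = 2 * ((n : Int) * 1 + triInt n) := by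
    have := two_triInt n; linarith
  have h2 : (m : Int) * ((m : Int) - 1) = 2 * triInt m := (two_triInt m).symm
  rw [h1, h2, fdiv_two_mul, fdiv_two_mul]
  congr 1
  ring
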